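-- pv_equiv track=rewrite | github.com/bulubula/everping | app/utils.py | parse_out_line
-- ===== SOURCE A (Python) =====
-- def parse_out_line(stdout_text: str) -> list[str]:
--     """
--     找最后一个 OUT= 行，按 \\t split
--     """
--     lines = [ln.rstrip("\n") for ln in stdout_text.splitlines()]
--     out_lines = [ln for ln in lines if ln.startswith("OUT=")]
--     if not out_lines:
--         return []
--     payload = out_lines[-1][4:]
--     if payload == "":
--         return []
--     return payload.split("\t")
-- ===== SOURCE B (Python) =====
-- def parse_out_line(stdout_text: str) -> list[str]:
--     """Fused single character-level pass: split into lines and track the last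
--     OUT= payload in one accumulator loop, with no intermediate line lists."""
--     best = None          # payload of the last OUT= line seen so far
--     cur = []             # characters of the current (unfinished) line
--     i, n = 0, len(stdout_text)
--     while i < n:
--         c = stdout_text[i]
--         if c == '\r' or c == '\n':
--             if c == '\r' and i + 1 < n and stdout_text[i + 1] == '\n':
--                 i += 1   # '\r\n' is one line break
--             line = ''.join(cur)
--             if line.startswith("OUT="):
--                 best = line[4:]
--             cur = []
--         else:
--             cur.append(c)
--         i += 1
--     if cur:
--         line = ''.join(cur)
--         if line.startswith("OUT="):
--             best = line[4:]
--     if not best: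
--         return []
--     return best.split("\t")
-- ===== Notes on version B (the rewrite author's own statement) =====
-- stated objective: alternative
-- what changed: Replaced A's staged pipeline (splitlines, rstrip map, OUT= filter list, [-1] indexing, split) by one fused character-level pass that builds each line and updates a single last-OUT=-payload accumulator as it goes, with no intermediate line lists.
import Mathlib
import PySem

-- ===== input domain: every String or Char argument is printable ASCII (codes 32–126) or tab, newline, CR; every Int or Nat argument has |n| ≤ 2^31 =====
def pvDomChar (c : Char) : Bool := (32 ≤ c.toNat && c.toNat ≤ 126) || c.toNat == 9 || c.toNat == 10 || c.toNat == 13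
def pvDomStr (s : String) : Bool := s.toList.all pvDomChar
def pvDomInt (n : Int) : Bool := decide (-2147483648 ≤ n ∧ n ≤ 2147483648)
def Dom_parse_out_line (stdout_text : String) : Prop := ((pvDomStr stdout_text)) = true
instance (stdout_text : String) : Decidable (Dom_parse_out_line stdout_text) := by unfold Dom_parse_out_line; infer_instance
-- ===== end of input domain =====

-- B fuses A's staged pipeline (splitlines, filter, last-index, split) into one
-- character-level pass updating a single last-OUT=-payload accumulator (objective: alternative).


-- ===== PORT A =====
-- ln.rstrip("\n"): drop trailing '\n' characters (hand port, exact: PySem has no rstrip-with-chars)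
def rstripNl (s : String) : String :=
  String.ofList ((s.toList.reverse.dropWhile (· == '\n')).reverse)

-- payload.split("\t") with the fixed nonempty separator "\t" (exact: Chars.splitOn is s.split(sep) for sep ≠ "")
def splitTabL (l : List Char) : List String :=
  (PySem.Chars.splitOn l "\t".toList).map String.ofList

def splitTab (s : String) : List String := splitTabL s.toList

def parse_out_line (stdout_text : String) : List String :=
  let lines := (PySem.Str.splitlines stdout_text).map rstripNl
  let out_lines := lines.filter (fun ln => PySem.Str.startswith ln "OUT=")
  -- "if not out_lines: return []" + "out_lines[-1]" together: pyGet? at -1 is none exactly on []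
  match PySem.List.pyGet? out_lines (-1) with
  | none => []
  | some last =>
    let payload := PySem.Str.slice last (some 4) none
    if payload = "" then [] else splitTab payload

-- ===== PORT B =====
-- "if line.startswith('OUT='): best = line[4:]" (line arrives reversed, as B's cur buffer is)
def updOut (best : Option (List Char)) (revLine : List Char) : Option (List Char) :=
  let line := revLine.reverse
  if PySem.Chars.startswith line "OUT=".toList then some (line.drop 4) else best

-- B's while loop: state = (remaining chars, current line buffer cur (reversed), best payload so far)
def parse_out_line_go : List Char → List Char → Option (List Char) → Option (List Char)
  | [], cur, best => if cur.isEmpty then best else updOut best cur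
  | '\r' :: '\n' :: rest, cur, best => parse_out_line_go rest [] (updOut best cur)
  | c :: rest, cur, best =>
    if c == '\n' || c == '\r' then parse_out_line_go rest [] (updOut best cur)
    else parse_out_line_go rest (c :: cur) best

def parse_out_line_alt (stdout_text : String) : List String :=
  match parse_out_line_go stdout_text.toList [] none with
  | none => []
  | some payload => if payload.isEmpty then [] else splitTabL payload

-- ===== PRECONDITION & SPEC =====
def Spec_parse_out_line (stdout_text : String) (out : List String) : Prop := out = parse_out_line_alt stdout_text
instance (stdout_text : String) (out : List String) : Decidable (Spec_parse_out_line stdout_text out) := by unfold Spec_parse_out_line; infer_instance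

-- ===== CLAIM =====
def Claim_equal_parse_out_line : Prop := ∀ (stdout_text : String), Dom_parse_out_line stdout_text → Spec_parse_out_line stdout_text (parse_out_line stdout_text)

-- ===== LEMMAS AND PROOFS =====

-- splitlines.go produces lines free of line-break characters (given the invariant on cur/acc)
theorem splitlines_go_no_break (isB : Char → Bool) (s cur : List Char) (acc : List (List Char))
    (hcur : ∀ c ∈ cur, isB c = false) (hacc : ∀ l ∈ acc, ∀ c ∈ l, isB c = false) :
    ∀ l ∈ PySem.Chars.splitlines.go isB s cur acc, ∀ c ∈ l, isB c = false := by
  induction s, cur, acc using PySem.Chars.splitlines.go.induct isB with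
  | case1 cur acc h =>
    intro l hl
    simp [PySem.Chars.splitlines.go, h] at hl
    exact hacc l hl
  | case2 cur acc h =>
    intro l hl
    simp [PySem.Chars.splitlines.go, h] at hl
    rcases hl with hl | hl
    · exact hacc l hl
    · subst hl; intro c hc; exact hcur c (by simpa using hc)
  | case3 rest cur acc ih =>
    intro l hl
    simp only [PySem.Chars.splitlines.go] at hl
    refine ih (by simp) ?_ l hl
    intro m hm
    rcases List.mem_cons.mp hm with hm | hm
    · subst hm; intro c hc; exact hcur c (by simpa using hc)
    · exact hacc m hm
  | case4 c rest cur acc hne hB ih =>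
    intro l hl
    rw [PySem.Chars.splitlines.go.eq_3 isB cur acc c rest hne, if_pos hB] at hl
    refine ih (by simp) ?_ l hl
    intro m hm
    rcases List.mem_cons.mp hm with hm | hm
    · subst hm; intro d hd; exact hcur d (by simpa using hd)
    · exact hacc m hm
  | case5 c rest cur acc hne hB ih =>
    intro l hl
    rw [PySem.Chars.splitlines.go.eq_3 isB cur acc c rest hne, if_neg hB] at hl
    refine ih ?_ hacc l hl
    intro d hd
    rcases List.mem_cons.mp hd with hd | hd
    · subst hd; simpa using hB
    · exact hcur d hd

theorem splitlines_no_newline (s : String) :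
    ∀ ln ∈ PySem.Str.splitlines s, ('\n' : Char) ∉ ln.toList := by
  intro ln hln
  simp only [PySem.Str.splitlines, List.mem_map] at hln
  obtain ⟨l, hl, rfl⟩ := hln
  intro hmem
  simp only [PySem.Chars.splitlines] at hl
  exact absurd (splitlines_go_no_break _ s.toList [] [] (by simp) (by simp) l hl '\n'
    (by simpa using hmem)) (by simp)

theorem rstripNl_of_no_newline (s : String) (h : ('\n' : Char) ∉ s.toList) :
    rstripNl s = s := by
  unfold rstripNl
  rw [List.dropWhile_eq_self_iff.mpr, List.reverse_reverse]
  · simp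
  · intro hl
    simp only [List.getElem_reverse, beq_iff_eq]
    intro hc
    exact h (hc ▸ List.getElem_mem _)

theorem pyGet_neg_one_eq_getLast? {α : Type} (xs : List α) :
    PySem.List.pyGet? xs (-1) = xs.getLast? := by
  cases xs with
  | nil => simp [PySem.List.pyGet?, PySem.List.pyIdx?]
  | cons a l =>
    simp [PySem.List.pyGet?, PySem.List.pyIdx?]
    rw [List.getLast?_eq_getElem?]
    simp

-- char equality with a break char, numerically
theorem beq_char_toNat (c d : Char) : (c == d) = decide (c.toNat = d.toNat) := by
  rw [Bool.eq_iff_iff]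
  simp only [beq_iff_eq, decide_eq_true_eq]
  constructor
  · rintro rfl; rfl
  · intro h
    have h2 : c.val.toNat = d.val.toNat := h
    exact Char.ext (UInt32.toNat_inj.mp h2)

-- splitlines' break predicate (applied by PySem.Chars.splitlines)
def isBreak (c : Char) : Bool :=
  decide (c.toNat = 10) || decide (c.toNat = 13) || decide (c.toNat = 11) || decide (c.toNat = 12) ||
  decide (c.toNat = 28) || decide (c.toNat = 29) || decide (c.toNat = 30) || decide (c.toNat = 133) ||
  decide (c.toNat = 8232) || decide (c.toNat = 8233)

-- On the printable-ASCII domain, splitlines' break test coincides with B's '\n'/'\r' test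
theorem isBreak_eq_of_dom (c : Char) (h : pvDomChar c = true) :
    isBreak c = (c == '\n' || c == '\r') := by
  rw [beq_char_toNat c '\n', beq_char_toNat c '\r']
  unfold pvDomChar at h
  unfold isBreak
  rw [Bool.eq_iff_iff]
  have h10 : ('\n').toNat = 10 := rfl
  have h13 : ('\r').toNat = 13 := rfl
  rw [h10, h13]
  simp only [Bool.or_eq_true, Bool.and_eq_true, decide_eq_true_eq, beq_iff_eq] at h ⊢
  omega

-- last OUT= payload as a left fold over the (reversed-buffer) lines
theorem fold_updOut_eq_find (L : List (List Char)) (b : Option (List Char)) :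
    List.foldl updOut b (L.map List.reverse) =
      match L.reverse.find? (fun l => PySem.Chars.startswith l "OUT=".toList) with
      | some ln => some (ln.drop 4)
      | none => b := by
  induction L generalizing b with
  | nil => simp
  | cons a L ih =>
    simp only [List.map_cons, List.foldl_cons, List.reverse_cons, List.find?_append, ih]
    cases hf : L.reverse.find? (fun l => PySem.Chars.startswith l "OUT=".toList) with
    | some ln => simp
    | none =>
      simp only [Option.none_or]
      unfold updOut
      simp only [List.reverse_reverse]
      cases hs : PySem.Chars.startswith a "OUT=".toList <;>
        · have hs' : PySem.Chars.startswith a ['O', 'U', 'T', '='] = _ := hs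
          simp [List.find?, hs']

-- B's fused loop computes the fold of updOut over splitlines' lines
theorem go_eq_fold (s cur : List Char) (acc : List (List Char)) (b : Option (List Char))
    (hdom : ∀ c ∈ s, pvDomChar c = true) :
    List.foldl updOut b ((PySem.Chars.splitlines.go isBreak s cur acc).map List.reverse) =
      parse_out_line_go s cur (List.foldl updOut b (acc.reverse.map List.reverse)) := by
  induction s, cur, acc using PySem.Chars.splitlines.go.induct isBreak generalizing b with
  | case1 cur acc h =>
    rw [PySem.Chars.splitlines.go.eq_1, if_pos h, parse_out_line_go.eq_1, if_pos h]
  | case2 cur acc h =>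
    rw [PySem.Chars.splitlines.go.eq_1, if_neg h, parse_out_line_go.eq_1, if_neg h]
    simp [updOut]
  | case3 rest cur acc ih =>
    rw [PySem.Chars.splitlines.go.eq_2]
    rw [ih _ (fun c hc => hdom c (by simp [hc]))]
    have hstep : parse_out_line_go ('\r' :: '\n' :: rest) cur
        (List.foldl updOut b (acc.reverse.map List.reverse)) =
        parse_out_line_go rest [] (updOut (List.foldl updOut b (acc.reverse.map List.reverse)) cur) := rfl
    rw [hstep]
    congr 1
    simp [updOut]
  | case4 c rest cur acc hne hB ih =>
    rw [PySem.Chars.splitlines.go.eq_3 isBreak cur acc c rest hne, if_pos hB]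
    have hnl : (c == '\n' || c == '\r') = true := by
      rw [← isBreak_eq_of_dom c (hdom c (by simp))]; exact hB
    rw [ih _ (fun d hd => hdom d (by simp [hd]))]
    have hstep : parse_out_line_go (c :: rest) cur (List.foldl updOut b (acc.reverse.map List.reverse)) =
        parse_out_line_go rest [] (updOut (List.foldl updOut b (acc.reverse.map List.reverse)) cur) := by
      cases rest with
      | nil =>
        rw [parse_out_line_go.eq_3]
        · rw [if_pos hnl]
        · intro h1 h2 h3; cases h3
      | cons d rest' =>
        by_cases hcr : c = '\r' ∧ d = '\n'
        · obtain ⟨rfl, rfl⟩ := hcr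
          rfl
        · rw [parse_out_line_go.eq_3]
          · rw [if_pos hnl]
          · intro h1 h2 h3
            injection h3 with e1 e2
            exact hcr ⟨h2, e1⟩
    rw [hstep]
    congr 1
    simp [updOut]
  | case5 c rest cur acc hne hB ih =>
    rw [PySem.Chars.splitlines.go.eq_3 isBreak cur acc c rest hne, if_neg hB]
    have hnl : (c == '\n' || c == '\r') = false := by
      rw [← isBreak_eq_of_dom c (hdom c (by simp))]; simpa using hB
    rw [ih _ (fun d hd => hdom d (by simp [hd]))]
    have hstep : parse_out_line_go (c :: rest) cur (List.foldl updOut b (acc.reverse.map List.reverse)) =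
        parse_out_line_go rest (c :: cur) (List.foldl updOut b (acc.reverse.map List.reverse)) := by
      cases rest with
      | nil =>
        rw [parse_out_line_go.eq_3]
        · rw [if_neg (by simp [hnl])]
        · intro h1 h2 h3; cases h3
      | cons d rest' =>
        by_cases hrn : c = '\r' ∧ d = '\n'
        · exfalso
          obtain ⟨rfl, rfl⟩ := hrn
          simp at hnl
        · rw [parse_out_line_go.eq_3]
          · rw [if_neg (by simp [hnl])]
          · intro h1 h2 h3
            injection h3 with e1 e2
            exact hrn ⟨h2, e1⟩
    rw [hstep]

-- splitlines applies exactly the isBreak predicate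
theorem splitlines_eq_go (l : List Char) :
    PySem.Chars.splitlines l = PySem.Chars.splitlines.go isBreak l [] [] := rfl

-- ===== VERDICT =====
theorem parse_out_line_spec : Claim_equal_parse_out_line := by
  intro s hdom
  unfold Spec_parse_out_line parse_out_line parse_out_line_alt
  have hdom' : ∀ c ∈ s.toList, pvDomChar c = true := by
    intro c hc
    exact List.all_eq_true.mp hdom c hc
  have hmap : (PySem.Str.splitlines s).map rstripNl = PySem.Str.splitlines s := by
    rw [List.map_congr_left (g := id)
      (fun ln hln => rstripNl_of_no_newline ln (splitlines_no_newline s ln hln)), List.map_id]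
  rw [hmap]
  have hB : parse_out_line_go s.toList [] none =
      match (PySem.Chars.splitlines s.toList).reverse.find?
          (fun l => PySem.Chars.startswith l "OUT=".toList) with
      | some ln => some (ln.drop 4)
      | none => none := by
    have := go_eq_fold s.toList [] [] none hdom'
    simp only [List.reverse_nil, List.map_nil, List.foldl_nil] at this
    rw [← this, ← splitlines_eq_go, fold_updOut_eq_find]
  rw [hB]
  simp only [pyGet_neg_one_eq_getLast?, ← List.head?_reverse, ← List.filter_reverse,
    List.head?_filter]
  have hfr : (PySem.Str.splitlines s).reverse.find? (fun ln => PySem.Str.startswith ln "OUT=") =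
      Option.map String.ofList ((PySem.Chars.splitlines s.toList).reverse.find?
        (fun l => PySem.Chars.startswith l "OUT=".toList)) := by
    rw [PySem.Str.splitlines, ← List.map_reverse, List.find?_map]
    have hpred : ((fun ln => PySem.Str.startswith ln "OUT=") ∘ String.ofList) =
        (fun l => PySem.Chars.startswith l "OUT=".toList) := by
      funext l
      simp [Function.comp, PySem.Str.startswith]
    rw [hpred]
  rw [hfr]
  cases hf : (PySem.Chars.splitlines s.toList).reverse.find?
      (fun l => PySem.Chars.startswith l "OUT=".toList) with
  | none => rfl
  | some ln =>
    simp only [Option.map_some]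
    have hsl : PySem.Str.slice (String.ofList ln) (some 4) none = String.ofList (ln.drop 4) := by
      rw [PySem.Str.slice]
      congr 1
      rw [String.toList_ofList]
      exact_mod_cast PySem.List.slice_from_natCast ln 4
    rw [hsl]
    by_cases hp : ln.drop 4 = []
    · have he : String.ofList (ln.drop 4) = "" := by rw [hp]
      rw [he, if_pos rfl, hp]
      rfl
    · have h1 : ¬ (String.ofList (ln.drop 4)) = "" := by
        intro h
        apply hp
        have := congrArg String.toList h
        simpa using this
      have h2 : (ln.drop 4).isEmpty = false := by
        simp [hp]
      rw [if_neg h1, h2]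
      simp only [Bool.false_eq_true, if_false]
      rw [splitTab, String.toList_ofList]
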